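-- pv_equiv track=rewrite | github.com/cabulous/leetcode | python/334.py | increasing_k_nums
-- ===== SOURCE A (Python) =====
-- import bisect
-- import math
--
-- def increasing_k_nums(nums, k):
--     if k == 0:
--         return True
--
--     inc = [math.inf] * (k - 1)
--
--     for num in nums:
--         idx = bisect.bisect_left(inc, num)
--         if idx == k - 1:
--             return True
--         inc[idx] = num
--
--     return False
-- ===== SOURCE B (Python) =====
-- def increasing_k_nums(nums, k):
--     # DP: for each element, length of the longest strictly increasing
--     # subsequence ending there; succeed as soon as one reaches k.
--     if k == 0:
--         return True
--     prev = []  # list of (value, lis-length-ending-at-value)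
--     for x in nums:
--         best = 0
--         for v, d in prev:
--             if v < x and d > best:
--                 best = d
--         if best + 1 >= k:
--             return True
--         prev.append((x, best + 1))
--     return False
-- ===== Notes on version B (the rewrite author's own statement) =====
-- stated objective: alternative
-- what changed: Replaces A's patience-sorting tail array (bisect_left into a [inf]*(k-1) array) by a quadratic DP that stores, for each seen element, the length of the longest strictly increasing subsequence ending there, succeeding as soon as one reaches k.
import Mathlib
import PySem

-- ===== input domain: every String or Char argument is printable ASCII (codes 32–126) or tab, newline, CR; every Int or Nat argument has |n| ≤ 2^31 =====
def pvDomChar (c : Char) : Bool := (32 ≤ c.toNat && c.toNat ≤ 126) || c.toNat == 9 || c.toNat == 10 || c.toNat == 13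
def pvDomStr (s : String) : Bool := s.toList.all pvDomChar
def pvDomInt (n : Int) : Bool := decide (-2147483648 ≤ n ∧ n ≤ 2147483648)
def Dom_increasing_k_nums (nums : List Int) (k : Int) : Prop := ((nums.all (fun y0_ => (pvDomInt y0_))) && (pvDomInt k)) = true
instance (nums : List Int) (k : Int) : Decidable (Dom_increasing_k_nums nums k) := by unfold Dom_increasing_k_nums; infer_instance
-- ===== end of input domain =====

-- B replaces A's patience-sorting tail array (bisect into [inf]*(k-1)) by a quadratic
-- DP over (value, LIS-length-ending-here) pairs: objective 'alternative', same results.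

-- ===== PORT A =====
-- math.inf is modelled as `none : Option Int` (greater than every Int), exact on Dom.
def pvOptLt : Option Int → Int → Bool
  | some a, x => decide (a < x)
  | none, _ => false

-- literal port of bisect.bisect_left's lo/hi loop
def pvBisect (a : List (Option Int)) (x : Int) (lo hi : Nat) : Nat :=
  if _h : lo < hi then
    let mid := (lo + hi) / 2
    if pvOptLt (a.getD mid none) x then pvBisect a x (mid + 1) hi else pvBisect a x lo mid
  else lo
termination_by hi - lo
decreasing_by all_goals omega

def pvALoop (k : Int) : List Int → List (Option Int) → Bool
  | [], _ => false
  | num :: rest, inc =>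
    let idx := pvBisect inc num 0 inc.length
    if (idx : Int) = k - 1 then true
    else pvALoop k rest (inc.set idx (some num))

def increasing_k_nums (nums : List Int) (k : Int) : Bool :=
  if k = 0 then true
  else pvALoop k nums (List.replicate (k - 1).toNat none)

-- ===== PORT B =====
def pvBest (prev : List (Int × Int)) (x : Int) : Int :=
  prev.foldl (fun best p => if p.1 < x ∧ p.2 > best then p.2 else best) 0

def pvBLoop (k : Int) : List Int → List (Int × Int) → Bool
  | [], _ => false
  | x :: rest, prev =>
    let best := pvBest prev x
    if best + 1 ≥ k then true
    else pvBLoop k rest (prev ++ [(x, best + 1)])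

def increasing_k_nums_alt (nums : List Int) (k : Int) : Bool :=
  if k = 0 then true else pvBLoop k nums []

-- ===== PRECONDITION & SPEC =====
-- Pre_ excludes inputs with k < 0 and non-empty nums, on which A raises IndexError
-- (inc is empty, inc[0] = num fails).
def Pre_increasing_k_nums (nums : List Int) (k : Int) : Prop := nums = [] ∨ 0 ≤ k
instance (nums : List Int) (k : Int) : Decidable (Pre_increasing_k_nums nums k) := by
  unfold Pre_increasing_k_nums; infer_instance

def pvWitness_increasing_k_nums : List Int × Int := ([1, 0, 2, 3], 3)

def Spec_increasing_k_nums (nums : List Int) (k : Int) (out : Bool) : Prop := out = increasing_k_nums_alt nums k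
instance (nums : List Int) (k : Int) (out : Bool) : Decidable (Spec_increasing_k_nums nums k out) := by unfold Spec_increasing_k_nums; infer_instance

-- ===== CLAIM (what is proved, stated in full; the proofs are below) =====
def Claim_equal_increasing_k_nums : Prop := ∀ (nums : List Int) (k : Int), Dom_increasing_k_nums nums k → Pre_increasing_k_nums nums k → Spec_increasing_k_nums nums k (increasing_k_nums nums k)


-- ===== LEMMAS AND PROOFS =====

-- number of elements of tails smaller than x
def pvCnt (tails : List Int) (x : Int) : Nat := tails.countP (fun v => decide (v < x))

-- The simulation invariant: `inc` is A's array after some prefix, `prev` B's pair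
-- list after the same prefix, m = (k-1).toNat.
def pvInv (inc : List (Option Int)) (prev : List (Int × Int)) (m : Nat) : Prop :=
  ∃ tails : List Int,
    inc = tails.map some ++ List.replicate (m - tails.length) none ∧
    tails.length ≤ m ∧
    List.Pairwise (· < ·) tails ∧
    (∀ i (h : i < tails.length), (tails[i], (i : Int) + 1) ∈ prev) ∧
    (∀ p ∈ prev, 1 ≤ p.2 ∧ ∃ h : p.2.toNat - 1 < tails.length, tails[p.2.toNat - 1] ≤ p.1)

theorem cnt_charact (tails : List Int) (x : Int) (hp : List.Pairwise (· < ·) tails) :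
    ∀ i (h : i < tails.length), (tails[i] < x ↔ i < pvCnt tails x) := by
  induction tails with
  | nil => intro i h; simp at h
  | cons t ts ih =>
    rcases List.pairwise_cons.mp hp with ⟨hlt, hts⟩
    intro i h
    by_cases htx : t < x
    · have hcnt : pvCnt (t :: ts) x = pvCnt ts x + 1 := by
        simp [pvCnt, htx]
      cases i with
      | zero => simpa [hcnt] using htx
      | succ j =>
        have hj : j < ts.length := by simpa using h
        have := ih hts j hj
        simpa [hcnt] using this
    · have hcnt : pvCnt (t :: ts) x = 0 := by
        simp only [pvCnt, List.countP_cons]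
        have : ts.countP (fun v => decide (v < x)) = 0 := by
          apply List.countP_eq_zero.mpr
          intro v hv
          have := hlt v hv
          simp only [decide_eq_true_eq]
          omega
        simp [this, htx]
      cases i with
      | zero => simpa [hcnt] using htx
      | succ j =>
        have hj : j < ts.length := by simpa using h
        have hgt := hlt _ (List.getElem_mem hj)
        have hel : (t :: ts)[j + 1] = ts[j] := by simp
        rw [hcnt, hel]
        constructor
        · intro hlt2; omega
        · intro hc; omega

theorem bisect_eq (a : List (Option Int)) (x : Int) (c : Nat)
    (hA : ∀ i (h : i < a.length), (pvOptLt a[i] x = true ↔ i < c)) :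
    ∀ n lo hi, hi - lo ≤ n → lo ≤ c → c ≤ hi → hi ≤ a.length → pvBisect a x lo hi = c := by
  intro n
  induction n with
  | zero =>
    intro lo hi hn hlc hch hha
    rw [pvBisect, dif_neg (by omega)]
    omega
  | succ n ih =>
    intro lo hi hn hlc hch hha
    by_cases hlh : lo < hi
    · rw [pvBisect, dif_pos hlh]
      show (if pvOptLt (a.getD ((lo + hi) / 2) none) x then pvBisect a x ((lo + hi) / 2 + 1) hi
            else pvBisect a x lo ((lo + hi) / 2)) = c
      have hmlt : (lo + hi) / 2 < hi := by omega
      have hmlo : lo ≤ (lo + hi) / 2 := by omega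
      have hmla : (lo + hi) / 2 < a.length := by omega
      rw [List.getD_eq_getElem a none hmla]
      have hiff := hA _ hmla
      by_cases hcond : pvOptLt a[(lo + hi) / 2] x = true
      · rw [if_pos hcond]
        have hmc := hiff.mp hcond
        exact ih ((lo + hi) / 2 + 1) hi (by omega) (by omega) (by omega) hha
      · rw [if_neg hcond]
        have hmc : ¬ (lo + hi) / 2 < c := fun hh => hcond (hiff.mpr hh)
        exact ih lo ((lo + hi) / 2) (by omega) hlc (by omega) (by omega)
    · rw [pvBisect, dif_neg hlh]
      omega

theorem best_le (x : Int) (B : Int) : ∀ (prev : List (Int × Int)) (acc : Int),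
    acc ≤ B → (∀ p ∈ prev, p.1 < x → p.2 ≤ B) →
    prev.foldl (fun best p => if p.1 < x ∧ p.2 > best then p.2 else best) acc ≤ B := by
  intro prev
  induction prev with
  | nil => intro acc h _; simpa using h
  | cons q rest ih =>
    intro acc hacc hall
    simp only [List.foldl_cons]
    apply ih
    · split_ifs with hq
      · exact hall q (by simp) hq.1
      · exact hacc
    · intro p hp hpx; exact hall p (by simp [hp]) hpx

theorem best_mono (x : Int) : ∀ (prev : List (Int × Int)) (acc : Int),
    acc ≤ prev.foldl (fun best p => if p.1 < x ∧ p.2 > best then p.2 else best) acc := by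
  intro prev
  induction prev with
  | nil => intro acc; simp
  | cons q rest ih =>
    intro acc
    simp only [List.foldl_cons]
    refine le_trans ?_ (ih _)
    split_ifs with hq
    · exact le_of_lt hq.2
    · exact le_refl _

theorem best_ge (x : Int) : ∀ (prev : List (Int × Int)) (acc : Int) (p : Int × Int),
    p ∈ prev → p.1 < x →
    p.2 ≤ prev.foldl (fun best p => if p.1 < x ∧ p.2 > best then p.2 else best) acc := by
  intro prev
  induction prev with
  | nil => intro acc p hp; simp at hp
  | cons q rest ih =>
    intro acc p hp hpx
    simp only [List.foldl_cons]
    rcases List.mem_cons.mp hp with rfl | hmem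
    · refine le_trans ?_ (best_mono x rest _)
      split_ifs with hq
      · exact le_refl _
      · simp only [hpx, true_and] at hq; omega
    · exact ih _ p hmem hpx

theorem step (inc : List (Option Int)) (prev : List (Int × Int)) (m : Nat) (x : Int)
    (h : pvInv inc prev m) :
    ∃ c : Nat, pvBisect inc x 0 inc.length = c ∧ pvBest prev x = (c : Int) ∧ c ≤ m ∧
      (c < m → pvInv (inc.set c (some x)) (prev ++ [(x, (c : Int) + 1)]) m) := by
  obtain ⟨tails, heq, hlen, hpair, h4, h5⟩ := h
  subst heq
  set c := pvCnt tails x with hcdef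
  have hct : c ≤ tails.length := List.countP_le_length
  have hlinc : (tails.map some ++ List.replicate (m - tails.length) none).length = m := by
    simp; omega
  have hchar := cnt_charact tails x hpair
  have hbh : ∀ i (hi : i < (tails.map some ++ List.replicate (m - tails.length) none).length),
      (pvOptLt (tails.map some ++ List.replicate (m - tails.length) none)[i] x = true ↔ i < c) := by
    intro i hi
    by_cases hit : i < tails.length
    · have hmi : i < (tails.map some).length := by simpa using hit
      rw [List.getElem_append_left hmi, List.getElem_map]
      simp only [pvOptLt, decide_eq_true_eq]
      exact hchar i hit
    · have hmi : (tails.map some).length ≤ i := by simpa using Nat.le_of_not_lt hit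
      rw [List.getElem_append_right hmi, List.getElem_replicate]
      simp only [pvOptLt, Bool.false_eq_true, false_iff]
      omega
  have hbis := bisect_eq _ x c hbh ((tails.map some ++ List.replicate (m - tails.length) none).length)
      0 _ (by omega) (by omega) (by omega) le_rfl
  have hbest : pvBest prev x = (c : Int) := by
    apply le_antisymm
    · apply best_le
      · exact_mod_cast Nat.zero_le c
      · intro p hp hpx
        obtain ⟨h1, hb, hle⟩ := h5 p hp
        have hltx : tails[p.2.toNat - 1] < x := lt_of_le_of_lt hle hpx
        have := (hchar _ hb).mp hltx
        omega
    · by_cases hc0 : c = 0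
      · rw [hc0]
        exact_mod_cast best_mono x prev 0
      · have hcl : c - 1 < tails.length := by omega
        have hmem := h4 (c - 1) hcl
        have hltx : tails[c - 1] < x := (hchar _ hcl).mpr (by omega)
        have hge := best_ge x prev 0 (tails[c - 1], ((c - 1 : Nat) : Int) + 1) hmem hltx
        have : ((c - 1 : Nat) : Int) + 1 = (c : Int) := by omega
        rw [this] at hge
        exact hge
  refine ⟨c, hbis, hbest, le_trans hct hlen, ?_⟩
  intro hcm
  by_cases hcase : c < tails.length
  · -- replace tails[c] by x
    have hxtc : x ≤ tails[c] := by
      have := hchar c hcase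
      omega
    refine ⟨tails.set c x, ?_, by simpa using hlen, ?_, ?_, ?_⟩
    · have hmc : c < (tails.map some).length := by simpa using hcase
      rw [List.set_append, if_pos hmc, ← List.map_set]
      simp
    · rw [List.pairwise_iff_getElem] at hpair ⊢
      intro i j hi hj hij
      simp only [List.length_set] at hi hj
      rw [List.getElem_set, List.getElem_set]
      rcases eq_or_ne c i with rfl | hci
      · rw [if_pos rfl, if_neg (by omega)]
        exact lt_of_le_of_lt hxtc (hpair c j hi hj hij)
      · rw [if_neg hci]
        rcases eq_or_ne c j with rfl | hcj
        · rw [if_pos rfl]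
          exact (hchar i hi).mpr (by omega)
        · rw [if_neg hcj]
          exact hpair i j hi hj hij
    · intro i hi
      simp only [List.length_set] at hi
      simp only [List.getElem_set]
      rcases eq_or_ne c i with rfl | hic
      · rw [if_pos rfl]
        exact List.mem_append_right _ (by simp)
      · rw [if_neg hic]
        exact List.mem_append_left _ (h4 i hi)
    · intro p hp
      rcases List.mem_append.mp hp with hold | hnew
      · obtain ⟨h1, hb, hle⟩ := h5 p hold
        refine ⟨h1, by simpa using hb, ?_⟩
        simp only [List.getElem_set]
        rcases eq_or_ne c (p.2.toNat - 1) with hec | hec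
        · rw [if_pos hec]
          simp only [← hec] at hle
          exact le_trans hxtc hle
        · rw [if_neg hec]
          exact hle
      · have hpe : p = (x, (c : Int) + 1) := by simpa using hnew
        subst hpe
        have hidx : ((x, (c : Int) + 1).2.toNat - 1) = c := by simp
        refine ⟨by simp, ?_, ?_⟩
        · simp only [hidx, List.length_set]
          exact hcase
        · simp
  · -- append x to tails
    have hceq : c = tails.length := by omega
    have hcnt_len : tails.countP (fun v => decide (v < x)) = tails.length := by
      have h' : pvCnt tails x = tails.length := by omega
      simpa [pvCnt] using h'
    have hall : ∀ a ∈ tails, a < x := by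
      intro a ha
      simpa using List.countP_eq_length.mp hcnt_len a ha
    refine ⟨tails ++ [x], ?_, by simp; omega, ?_, ?_, ?_⟩
    · have hrep : m - tails.length = (m - (tails.length + 1)) + 1 := by omega
      rw [List.set_append, if_neg (by simp; omega)]
      rw [hrep, List.replicate_succ]
      simp [hceq]
    · rw [List.pairwise_append]
      refine ⟨hpair, by simp, ?_⟩
      intro a ha b hb
      simp only [List.mem_singleton] at hb
      subst hb
      exact hall a ha
    · intro i hi
      simp only [List.length_append, List.length_singleton] at hi
      by_cases hit : i < tails.length
      · rw [List.getElem_append_left hit]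
        exact List.mem_append_left _ (h4 i hit)
      · have hie : i = tails.length := by omega
        subst hie
        rw [List.getElem_append_right (le_refl _)]
        simp only [Nat.sub_self, List.getElem_cons_zero]
        exact List.mem_append_right _ (by simp [hceq])
    · intro p hp
      rcases List.mem_append.mp hp with hold | hnew
      · obtain ⟨h1, hb, hle⟩ := h5 p hold
        refine ⟨h1, by simp; omega, ?_⟩
        rw [List.getElem_append_left hb]
        exact hle
      · have hpe : p = (x, (c : Int) + 1) := by simpa using hnew
        subst hpe
        have hidx : ((x, (c : Int) + 1).2.toNat - 1) = tails.length := by simp [hceq]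
        refine ⟨by simp, ?_, ?_⟩
        · simp only [hidx, List.length_append, List.length_singleton]
          omega
        · simp only [hidx]
          rw [List.getElem_append_right (le_refl _)]
          simp

theorem loop_eq (k : Int) (hk : 1 ≤ k) :
    ∀ (nums : List Int) (inc : List (Option Int)) (prev : List (Int × Int)),
      pvInv inc prev (k - 1).toNat → pvALoop k nums inc = pvBLoop k nums prev := by
  intro nums
  induction nums with
  | nil => intro inc prev _; rfl
  | cons x rest ih =>
    intro inc prev hinv
    obtain ⟨c, hbis, hbest, hcm, hpres⟩ := step inc prev ((k - 1).toNat) x hinv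
    show (if ((pvBisect inc x 0 inc.length : Nat) : Int) = k - 1 then true
          else pvALoop k rest (inc.set (pvBisect inc x 0 inc.length) (some x))) =
        (if pvBest prev x + 1 ≥ k then true
          else pvBLoop k rest (prev ++ [(x, pvBest prev x + 1)]))
    rw [hbis, hbest]
    have hck : (c : Int) ≤ k - 1 := by omega
    by_cases hhit : (c : Int) = k - 1
    · rw [if_pos hhit, if_pos (by omega)]
    · rw [if_neg hhit, if_neg (by omega)]
      exact ih _ _ (hpres (by omega))

theorem inv_init (m : Nat) : pvInv (List.replicate m none) [] m := by
  refine ⟨[], by simp, by simp, by simp, by simp, by simp⟩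

-- ===== VERDICT (by name: the statement is the Claim_ definition above) =====
theorem increasing_k_nums_spec : Claim_equal_increasing_k_nums := by
  intro nums k _dom hpre
  unfold Spec_increasing_k_nums increasing_k_nums increasing_k_nums_alt
  by_cases hk0 : k = 0
  · simp [hk0]
  · simp only [if_neg hk0]
    rcases hpre with hnil | hk
    · subst hnil; rfl
    · exact loop_eq k (by omega) nums _ [] (inv_init _)
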